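-- pv_equiv track=rewrite | github.com/Amaranese/gameOfWar | actionFunctions.py | preserveNextMove
-- ===== SOURCE A (Python) =====
-- def preserveNextMove(country):
--     adjustedNextMove = []
--     for nextMove in country['Nextmoves']:
--         if 'sabotaged' in nextMove:
--             adjustedNextMove = ['sabotaged']
--             return(adjustedNextMove)
--
--
--         if 'pending' in nextMove:
--             adjustedNextMove = adjustedNextMove + [nextMove]
--         else:
--             adjustedNextMove = adjustedNextMove + []
--     return(adjustedNextMove)
-- ===== SOURCE B (Python) =====
-- def preserveNextMove(country):
--     moves = country['Nextmoves']
--     if any('sabotaged' in m for m in moves):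
--         return ['sabotaged']
--     return [m for m in moves if 'pending' in m]
-- ===== Notes on version B (the rewrite author's own statement) =====
-- stated objective: idiomatic
-- what changed: Replaces A's single accumulator loop with an early return by two separate passes: an any() existence scan for 'sabotaged', then a filter comprehension for 'pending'.
import Mathlib
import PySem

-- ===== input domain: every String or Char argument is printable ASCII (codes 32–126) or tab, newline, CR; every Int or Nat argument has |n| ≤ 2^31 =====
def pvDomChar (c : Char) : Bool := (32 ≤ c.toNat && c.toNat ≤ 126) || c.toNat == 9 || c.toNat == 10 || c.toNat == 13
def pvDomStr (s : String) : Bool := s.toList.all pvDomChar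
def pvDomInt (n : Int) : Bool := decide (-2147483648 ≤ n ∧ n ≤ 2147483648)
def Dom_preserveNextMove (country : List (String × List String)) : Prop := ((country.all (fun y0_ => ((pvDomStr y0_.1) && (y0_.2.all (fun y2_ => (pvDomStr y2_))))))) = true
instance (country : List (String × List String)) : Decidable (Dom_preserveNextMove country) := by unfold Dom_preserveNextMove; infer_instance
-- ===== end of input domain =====

-- B replaces A's single accumulator loop with an early return by two passes (an existence
-- scan for 'sabotaged', then a filter for 'pending'); idiomatic, same cost.


-- ===== PORT A =====
-- A's loop: accumulator, early return on 'sabotaged', else conditionally append.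
def pvLoopA : List String → List String → List String
  | [], acc => acc
  | m :: rest, acc =>
      if PySem.Str.isIn "sabotaged" m then ["sabotaged"]
      else if PySem.Str.isIn "pending" m then pvLoopA rest (acc ++ [m])
      else pvLoopA rest (acc ++ [])

def preserveNextMove (country : List (String × List String)) : List String :=
  match (PySem.Dict.mk country).get? "Nextmoves" with
  | none => []   -- KeyError in Python; excluded by Pre_
  | some moves => pvLoopA moves []

-- ===== PORT B =====
def preserveNextMove_alt (country : List (String × List String)) : List String :=
  match (PySem.Dict.mk country).get? "Nextmoves" with
  | none => []   -- KeyError in Python; excluded by Pre_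
  | some moves =>
      if moves.any (fun m => PySem.Str.isIn "sabotaged" m) then ["sabotaged"]
      else moves.filter (fun m => PySem.Str.isIn "pending" m)

-- ===== PRECONDITION & SPEC =====
-- Pre_ excludes exactly the dicts without a 'Nextmoves' key, on which A raises KeyError.
def Pre_preserveNextMove (country : List (String × List String)) : Prop :=
  (PySem.Dict.mk country).contains "Nextmoves" = true
instance (country : List (String × List String)) : Decidable (Pre_preserveNextMove country) := by unfold Pre_preserveNextMove; infer_instance

def pvWitness_preserveNextMove : (List (String × List String)) :=
  [("Nextmoves", ["attack pending", "defend"])]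

def Spec_preserveNextMove (country : List (String × List String)) (out : List String) : Prop := out = preserveNextMove_alt country
instance (country : List (String × List String)) (out : List String) : Decidable (Spec_preserveNextMove country out) := by unfold Spec_preserveNextMove; infer_instance

-- ===== CLAIM (what is proved, stated in full; the proofs are below) =====
def Claim_equal_preserveNextMove : Prop := ∀ (country : List (String × List String)), Dom_preserveNextMove country → Pre_preserveNextMove country → Spec_preserveNextMove country (preserveNextMove country)

-- ===== LEMMAS AND PROOFS =====
-- A's loop equals B's two passes, for any accumulator.
theorem pvLoopA_eq (moves acc : List String) :
    pvLoopA moves acc =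
      if moves.any (fun m => PySem.Str.isIn "sabotaged" m) then ["sabotaged"]
      else acc ++ moves.filter (fun m => PySem.Str.isIn "pending" m) := by
  induction moves generalizing acc with
  | nil => simp [pvLoopA]
  | cons m rest ih =>
      simp only [pvLoopA, List.any_cons, List.filter_cons, PySem.Str.isIn_eq, ih]
      split_ifs <;> simp_all <;>
        (obtain ⟨x, hx, hx2⟩ := ‹∃ x ∈ rest, PySem.Chars.isIn _ x.toList = true›;
         exact absurd hx2 (by simp [‹∀ x ∈ rest, _› x hx]))

-- ===== VERDICT (by name: the statement is the Claim_ definition above) =====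
theorem preserveNextMove_spec : Claim_equal_preserveNextMove := by
  intro country _ _
  unfold Spec_preserveNextMove preserveNextMove preserveNextMove_alt
  cases (PySem.Dict.mk country).get? "Nextmoves" with
  | none => rfl
  | some moves => simp [pvLoopA_eq]
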